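-- pv_equiv track=rewrite | github.com/foundling/lang | py/find_composites.py | find_composites
-- ===== SOURCE A (Python) =====
-- def find_composites(N):
--
--     composites = []
--     dividend = 0
--     count = 0
--
--     while count <= N:
--
--         dividend += 1
--
--         for divisor in range(2,dividend + 1):
--             if dividend % divisor == 0 and divisor != dividend:
--                 composites.append(dividend)
--                 count += 1
--                 break
--
--     return composites
-- ===== SOURCE B (Python) =====
-- def _is_composite(n):
--     for d in range(2, n):
--         if d * d > n:
--             return False
--         if n % d == 0:
--             return True
--     return False
--
-- def find_composites(N):
--     k = N + 1
--     if k <= 0: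
--         return []
--     bound = 2 * k + 2  # the k-th composite is at most 2k+2 (the evens 4..2k+2 alone are k composites)
--     return [n for n in range(4, bound + 1) if _is_composite(n)][:k]
-- ===== Notes on version B (the rewrite author's own statement) =====
-- stated objective: faster
-- what changed: Replace the unbounded while-loop that scans all divisors 2..n of every candidate with a bounded list comprehension over [4, 2(N+1)+2] (density bound: the evens alone supply N+1 composites) filtered by sqrt-limited trial division, then sliced to N+1 elements.
import Mathlib
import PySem

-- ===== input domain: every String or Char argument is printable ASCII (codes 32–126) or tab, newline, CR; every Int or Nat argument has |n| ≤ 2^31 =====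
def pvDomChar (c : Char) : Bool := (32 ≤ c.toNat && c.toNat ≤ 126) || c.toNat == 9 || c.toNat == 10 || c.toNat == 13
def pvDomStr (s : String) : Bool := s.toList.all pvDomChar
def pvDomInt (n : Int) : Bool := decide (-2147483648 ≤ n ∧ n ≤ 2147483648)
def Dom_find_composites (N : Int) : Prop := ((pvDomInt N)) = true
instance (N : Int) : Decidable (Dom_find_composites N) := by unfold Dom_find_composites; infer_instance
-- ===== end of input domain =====

-- B replaces A's unbounded while-loop with full divisor scans by a bounded comprehension over
-- [4, 2(N+1)+2] filtered by sqrt-limited trial division; measured faster (asymptotic mechanism).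

-- ===== PORT A =====
-- the while loop; fuel (2*N+4).toNat only makes the loop total: the body runs once per dividend
-- 1..D where D is the (N+1)-th composite, and D ≤ 2N+4 (the evens 4..2N+4 alone are N+1 composites).
-- the inner 'for divisor in range(2, dividend+1)' acts only at its first match and then breaks,
-- so it is transliterated as find? over the same range with the same test.
def loopA (fuel : Nat) (N : Int) (composites : List Int) (dividend count : Int) : List Int :=
  match fuel with
  | 0 => composites
  | Nat.succ f =>
    if count ≤ N then
      let d := dividend + 1
      match (PySem.List.pyRange 2 (d + 1) 1).find?
          (fun divisor => PySem.Int.mod d divisor == 0 && divisor != d) with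
      | some _ => loopA f N (composites ++ [d]) d (count + 1)
      | none => loopA f N composites d count
    else composites

def find_composites (N : Int) : List Int := loopA (2 * N + 4).toNat N [] 0 0

-- ===== PORT B =====
-- the 'for d in range(2, n)' trial-division loop of _is_composite, with its two breaks
def isCompLoop (n : Int) : List Int → Bool
  | [] => false
  | d :: rest =>
    if d * d > n then false
    else if PySem.Int.mod n d == 0 then true
    else isCompLoop n rest

def is_composite (n : Int) : Bool := isCompLoop n (PySem.List.pyRange 2 n 1)

-- 'lst[:k]' with k ≥ 1 is List.take k.toNat
def find_composites_alt (N : Int) : List Int :=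
  let k := N + 1
  if k ≤ 0 then []
  else
    let bound := 2 * k + 2
    (((PySem.List.pyRange 4 (bound + 1) 1).filter (fun n => is_composite n)).take k.toNat)

-- ===== PRECONDITION & SPEC =====
def Spec_find_composites (N : Int) (out : List Int) : Prop := out = find_composites_alt N
instance (N : Int) (out : List Int) : Decidable (Spec_find_composites N out) := by unfold Spec_find_composites; infer_instance

-- ===== CLAIM (what is proved, stated in full; the proofs are below) =====
def Claim_equal_find_composites : Prop := ∀ (N : Int), Dom_find_composites N → Spec_find_composites N (find_composites N)

-- ===== LEMMAS AND PROOFS =====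

-- [a, a+1, ..., a+f-1]
def intList (a : Int) : Nat → List Int
  | 0 => []
  | f + 1 => a :: intList (a + 1) f

theorem intList_append (a : Int) (m n : Nat) :
    intList a (m + n) = intList a m ++ intList (a + m) n := by
  induction m generalizing a with
  | zero => simp [intList]
  | succ m ih =>
    have h : m + 1 + n = (m + n) + 1 := by omega
    rw [h]
    simp only [intList, ih (a + 1), List.cons_append]
    have h2 : a + 1 + (m : Int) = a + ((m + 1 : Nat) : Int) := by push_cast; ring
    rw [h2]

theorem pyRange_eq_intList_aux (f : Nat) : ∀ (a b : Int), (b - a).toNat = f →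
    PySem.List.pyRange a b 1 = intList a f := by
  induction f with
  | zero =>
    intro a b h
    rw [PySem.List.pyRange_one_eq_nil (by omega), intList]
  | succ f ih =>
    intro a b h
    rw [PySem.List.pyRange_one_cons (by omega), intList, ih (a + 1) b (by omega)]

theorem pyRange_eq_intList (a b : Int) :
    PySem.List.pyRange a b 1 = intList a (b - a).toNat :=
  pyRange_eq_intList_aux (b - a).toNat a b rfl

theorem isCompLoop_spec (n : Int) (f : Nat) : ∀ (a : Int), 0 ≤ a →
    (isCompLoop n (intList a f) = true ↔ ∃ e, a ≤ e ∧ e < a + f ∧ e * e ≤ n ∧ e ∣ n) := by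
  induction f with
  | zero =>
    intro a _
    simp only [intList, isCompLoop]
    constructor
    · intro h; exact absurd h (by simp)
    · rintro ⟨e, h1, h2, -, -⟩; exfalso; omega
  | succ f ih =>
    intro a ha0
    rw [show intList a (f + 1) = a :: intList (a + 1) f from rfl, isCompLoop]
    by_cases hbig : a * a > n
    · rw [if_pos hbig]
      constructor
      · intro h; exact absurd h (by simp)
      · rintro ⟨e, h1, -, h3, -⟩
        nlinarith [mul_nonneg (by omega : (0 : Int) ≤ e - a) (by omega : (0 : Int) ≤ e + a)]
    · rw [if_neg hbig]
      by_cases hdvd : (PySem.Int.mod n a == 0) = true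
      · rw [if_pos hdvd]
        have := (PySem.Int.mod_eq_zero_iff_dvd n a).mp (by simpa using hdvd)
        exact iff_of_true rfl ⟨a, le_refl a, by push_cast; omega, by omega, this⟩
      · rw [if_neg hdvd, ih (a + 1) (by omega)]
        constructor
        · rintro ⟨e, h1, h2, h3, h4⟩
          exact ⟨e, by omega, by push_cast at h2 ⊢; omega, h3, h4⟩
        · rintro ⟨e, h1, h2, h3, h4⟩
          refine ⟨e, ?_, by push_cast at h2 ⊢; omega, h3, h4⟩
          rcases eq_or_lt_of_le h1 with rfl | h1
          · exact absurd (by simp [(PySem.Int.mod_eq_zero_iff_dvd n a).mpr h4] :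
              (PySem.Int.mod n a == 0) = true) hdvd
          · omega

theorem is_composite_iff (n : Int) :
    is_composite n = true ↔ ∃ d, 2 ≤ d ∧ d < n ∧ d ∣ n := by
  rw [is_composite, pyRange_eq_intList, isCompLoop_spec n (n - 2).toNat 2 (by norm_num)]
  constructor
  · rintro ⟨e, h1, h2, h3, h4⟩
    exact ⟨e, h1, by omega, h4⟩
  · rintro ⟨d, h1, h2, h3⟩
    obtain ⟨c, hc⟩ := h3
    rcases le_total d c with h | h
    · exact ⟨d, h1, by omega, by nlinarith, ⟨c, hc⟩⟩
    · have hc2 : 2 ≤ c := by nlinarith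
      have hcn : c < n := by nlinarith
      exact ⟨c, hc2, by omega, by nlinarith, ⟨d, by rw [hc]; ring⟩⟩

theorem findDiv_eq (m : Int) :
    ((PySem.List.pyRange 2 (m + 1) 1).find?
        (fun divisor => PySem.Int.mod m divisor == 0 && divisor != m)).isSome = is_composite m := by
  rw [Bool.eq_iff_iff, List.find?_isSome, is_composite_iff]
  constructor
  · rintro ⟨d, hd, hp⟩
    rw [PySem.List.mem_pyRange_one] at hd
    simp only [Bool.and_eq_true, beq_iff_eq, bne_iff_ne] at hp
    have := (PySem.Int.mod_eq_zero_iff_dvd m d).mp hp.1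
    exact ⟨d, hd.1, by omega, this⟩
  · rintro ⟨d, h1, h2, h3⟩
    refine ⟨d, ?_, ?_⟩
    · rw [PySem.List.mem_pyRange_one]; omega
    · simp only [Bool.and_eq_true, beq_iff_eq, bne_iff_ne]
      exact ⟨(PySem.Int.mod_eq_zero_iff_dvd m d).mpr h3, by omega⟩

theorem loopA_eq (fuel : Nat) (N : Int) (acc : List Int) (dividend count : Int) :
    loopA fuel N acc dividend count =
      acc ++ ((intList (dividend + 1) fuel).filter (fun n => is_composite n)).take
        (N + 1 - count).toNat := by
  induction fuel generalizing acc dividend count with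
  | zero => simp [loopA, intList]
  | succ f ih =>
    rw [loopA]
    by_cases hc : count ≤ N
    · simp only [hc, if_true]
      have hfind := findDiv_eq (dividend + 1)
      rw [show intList (dividend + 1) (f + 1) = (dividend + 1) :: intList (dividend + 2) f by
        simp [intList]; ring_nf]
      cases hf : (PySem.List.pyRange 2 (dividend + 1 + 1) 1).find?
          (fun divisor => PySem.Int.mod (dividend + 1) divisor == 0 && divisor != (dividend + 1)) with
      | some w =>
        have hcomp : is_composite (dividend + 1) = true := by
          rw [← hfind, hf]; rfl
        rw [ih (acc ++ [dividend + 1]) (dividend + 1) (count + 1)]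
        rw [List.filter_cons_of_pos hcomp]
        rw [show (N + 1 - count).toNat = (N + 1 - (count + 1)).toNat + 1 by omega]
        rw [List.take_succ_cons]
        simp [show dividend + 1 + 1 = dividend + 2 by ring]
      | none =>
        have hcomp : is_composite (dividend + 1) = false := by
          rw [← hfind, hf]; rfl
        rw [ih acc (dividend + 1) count]
        rw [List.filter_cons_of_neg (by simp [hcomp])]
        simp [show dividend + 1 + 1 = dividend + 2 by ring]
    · simp only [hc, if_false]
      rw [show (N + 1 - count).toNat = 0 by omega]
      simp

theorem is_composite_one : is_composite 1 = false := by
  rw [Bool.eq_false_iff]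
  intro h
  obtain ⟨d, h1, h2, _⟩ := (is_composite_iff 1).mp h
  omega

theorem is_composite_two : is_composite 2 = false := by
  rw [Bool.eq_false_iff]
  intro h
  obtain ⟨d, h1, h2, _⟩ := (is_composite_iff 2).mp h
  omega

theorem is_composite_three : is_composite 3 = false := by
  rw [Bool.eq_false_iff]
  intro h
  obtain ⟨d, h1, h2, h3⟩ := (is_composite_iff 3).mp h
  interval_cases d
  · exact absurd h3 (by decide)

-- ===== VERDICT (by name: the statement is the Claim_ definition above) =====
theorem find_composites_spec : Claim_equal_find_composites := by
  unfold Claim_equal_find_composites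
  intro N _
  unfold Spec_find_composites find_composites find_composites_alt
  rw [loopA_eq]
  by_cases hk : N + 1 ≤ 0
  · simp only [hk, if_true]
    rw [show (N + 1 - 0).toNat = 0 by omega]
    simp
  · simp only [hk, if_false]
    have hK : ∃ K : Nat, (K : Int) = N + 1 ∧ 1 ≤ K := ⟨(N + 1).toNat, by omega, by omega⟩
    obtain ⟨K, hKe, hK1⟩ := hK
    rw [show (2 * N + 4).toNat = 3 + (2 * K - 1) by omega]
    rw [intList_append, List.filter_append]
    rw [show (0 : Int) + 1 = 1 by ring]
    rw [show intList 1 3 = [1, 2, 3] by simp [intList]]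
    rw [pyRange_eq_intList]
    rw [show ((2 * (N + 1) + 2 + 1 - 4 : Int)).toNat = 2 * K - 1 by omega]
    rw [show ((1 : Int) + ((3 : Nat) : Int)) = 4 by norm_num]
    rw [show (N + 1 - 0).toNat = (N + 1).toNat by omega]
    rw [show List.filter (fun n => is_composite n) [1, 2, 3] = [] by
      simp [List.filter, is_composite_one, is_composite_two, is_composite_three]]
    simp
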